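-- pv_equiv track=rewrite | github.com/parasiitism/AlgoDaily | interviews/smartnews/remove-non-adjacent-mins/main.py | f
-- ===== SOURCE A (Python) =====
-- def f(nums):
--     """
--         1st approach: sort + compare
--         - sort
--         - compare, the result must be from the 3 smallest items
--
--         e.g. [....-3,-4,-3,.....]
--
--         -3-4 = -7 but they are adajent
--         -4-3 = -7 but they are adajent
--         -3-3 = -6 they are non-adajent finally
--
--         Time    O(nlogn)
--     """
--     arr = []
--     for i in range(1, len(nums)-1):
--         arr.append([nums[i], i])
--     arr = sorted(arr, key=lambda x: x[0])
--     a = arr[0]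
--     b = arr[1]
--     c = arr[2]
--     if abs(a[1] - b[1]) > 1:
--         return a[0] + b[0], a[1], b[1]
--     elif abs(a[1] - c[1]) > 1:
--         return a[0] + c[0], a[1], c[1]
--     elif abs(b[1] - c[1]) > 1:
--         return b[0] + c[0], b[1], c[1]
-- ===== SOURCE B (Python) =====
-- def f(nums):
--     # Single pass over the interior elements, keeping only the three smallest
--     # (value, index) pairs (stable for ties) instead of building and sorting
--     # the whole list.
--     top = []  # at most 3 pairs, sorted ascending by value, stable
--     for i, v in enumerate(nums[1:len(nums) - 1], 1):
--         if len(top) == 3: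
--             if top[2][0] <= v:
--                 continue
--             del top[2]
--         j = 0
--         while j < len(top) and top[j][0] <= v:
--             j += 1
--         top.insert(j, (v, i))
--     a, b, c = top[0], top[1], top[2]
--     if abs(a[1] - b[1]) > 1:
--         return a[0] + b[0], a[1], b[1]
--     elif abs(a[1] - c[1]) > 1:
--         return a[0] + c[0], a[1], c[1]
--     elif abs(b[1] - c[1]) > 1:
--         return b[0] + c[0], b[1], c[1]
-- ===== Notes on version B (the rewrite author's own statement) =====
-- stated objective: alternative
-- what changed: B replaces A's build-all-interior-pairs-then-stable-sort with a single pass that maintains only the three smallest (value,index) pairs by bounded stable insertion (skipping elements no smaller than the current third), then applies the same non-adjacent-pair selection.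
import Mathlib
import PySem

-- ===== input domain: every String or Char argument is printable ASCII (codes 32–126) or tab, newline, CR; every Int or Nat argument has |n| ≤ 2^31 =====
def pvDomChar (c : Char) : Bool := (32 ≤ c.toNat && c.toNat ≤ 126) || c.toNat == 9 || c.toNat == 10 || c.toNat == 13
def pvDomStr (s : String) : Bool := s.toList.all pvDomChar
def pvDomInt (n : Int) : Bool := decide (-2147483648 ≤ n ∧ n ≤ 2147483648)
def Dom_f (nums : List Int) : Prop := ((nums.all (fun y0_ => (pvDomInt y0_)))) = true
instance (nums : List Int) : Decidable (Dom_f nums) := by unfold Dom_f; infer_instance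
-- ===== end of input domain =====

-- B replaces A's build-everything-then-sort with a single pass keeping only the three
-- smallest (value, index) pairs; equal return value on all lists of length ≥ 5.

-- ===== PORT A =====
-- literal port of A: build [(nums[i], i)] for interior i, stable-sort by value,
-- take the first three, return the first non-adjacent pair (IndexError on arr[0..2]
-- when the list is too short → none, excluded by Pre_f).
def f (nums : List Int) : Option (Int × Int × Int) :=
  match PySem.List.sorted
      ((PySem.List.pyRange 1 (PySem.List.len nums - 1) 1).foldl
        (fun arr i => arr ++ [(PySem.List.pyGetD nums i 0, i)]) [])  -- nums[i] always in range here
      (fun x => x.1) with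
  | a :: b :: c :: _ =>
      if 1 < |a.2 - b.2| then some (a.1 + b.1, a.2, b.2)
      else if 1 < |a.2 - c.2| then some (a.1 + c.1, a.2, c.2)
      else if 1 < |b.2 - c.2| then some (b.1 + c.1, b.2, c.2)
      else none
  | _ => none

-- ===== PORT B =====
-- B's inner while loop: insert x after the existing entries whose value is ≤ x's value
def bInsert (top : List (Int × Int)) (x : Int × Int) : List (Int × Int) :=
  match top with
  | [] => [x]
  | y :: ys => if y.1 ≤ x.1 then y :: bInsert ys x else x :: y :: ys

-- B's loop body: p = (i, v); skip when top is full and v is no smaller than top[2],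
-- else drop top[2] when full ('del top[2]') and insert (v, i)
def bStep (top : List (Int × Int)) (p : Int × Int) : List (Int × Int) :=
  if top.length = 3 ∧ (PySem.List.pyGetD top 2 (0, 0)).1 ≤ p.2 then top  -- top[2] in range: length = 3
  else bInsert (if top.length = 3 then top.take 2 else top) (p.2, p.1)

-- literal port of B (Source B): one pass over enumerate(nums[1:len(nums)-1], 1)
def f_alt (nums : List Int) : Option (Int × Int × Int) :=
  let top := (PySem.List.enumerate
      (PySem.List.slice nums (some 1) (some (PySem.List.len nums - 1))) 1).foldl bStep []
  -- a, b, c = top[0], top[1], top[2]  (IndexError → none)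
  (PySem.List.pyGet? top 0).bind fun a =>
  (PySem.List.pyGet? top 1).bind fun b =>
  (PySem.List.pyGet? top 2).bind fun c =>
      if 1 < |a.2 - b.2| then some (a.1 + b.1, a.2, b.2)
      else if 1 < |a.2 - c.2| then some (a.1 + c.1, a.2, c.2)
      else if 1 < |b.2 - c.2| then some (b.1 + c.1, b.2, c.2)
      else none

-- ===== PRECONDITION & SPEC =====
-- A raises IndexError (arr[0]/arr[1]/arr[2]) when there are fewer than 3 interior elements.
def Pre_f (nums : List Int) : Prop := 5 ≤ nums.length
instance (nums : List Int) : Decidable (Pre_f nums) := by unfold Pre_f; infer_instance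
def pvWitness_f : List Int := [3, 1, 4, 1, 5]

def Spec_f (nums : List Int) (out : Option (Int × Int × Int)) : Prop := out = f_alt nums
instance (nums : List Int) (out : Option (Int × Int × Int)) : Decidable (Spec_f nums out) := by unfold Spec_f; infer_instance

-- ===== CLAIM (what is proved, stated in full; the proofs are below) =====
def Claim_equal_f : Prop := ∀ (nums : List Int), Dom_f nums → Pre_f nums → Spec_f nums (f nums)

-- ===== LEMMAS AND PROOFS =====

-- bInsert is insertion before the first strictly larger value
theorem bInsert_eq_insertBy (top : List (Int × Int)) (x : Int × Int) :
    bInsert top x = PySem.List.insertBy (fun a b => decide (a.1 < b.1)) x top := by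
  induction top with
  | nil => rfl
  | cons y ys ih =>
      simp only [bInsert, PySem.List.insertBy, ih]
      by_cases h : y.1 ≤ x.1
      · simp [h, not_lt.mpr h]
      · simp [h, lt_of_not_ge h]

theorem bInsert_length (top : List (Int × Int)) (x : Int × Int) :
    (bInsert top x).length = top.length + 1 := by
  induction top with
  | nil => rfl
  | cons y ys ih =>
      simp only [bInsert]
      by_cases h : y.1 ≤ x.1 <;> simp [h, ih]

theorem take_cons_take {α : Type} (y : α) (l : List α) (n : Nat) :
    (y :: l.take n).take n = (y :: l).take n := by
  cases n with
  | zero => simp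
  | succ m =>
      simp only [List.take_succ_cons, List.take_take]
      have : min m (m + 1) = m := by omega
      rw [this]

theorem take_insertBy (p : Int × Int → Int × Int → Bool) (x : Int × Int)
    (l : List (Int × Int)) (n : Nat) :
    (PySem.List.insertBy p x (l.take n)).take n = (PySem.List.insertBy p x l).take n := by
  induction l generalizing n with
  | nil => simp
  | cons y ys ih =>
      cases n with
      | zero => simp
      | succ m =>
          simp only [List.take_succ_cons, PySem.List.insertBy]
          by_cases h : p x y
          · simp only [h, if_true, List.take_succ_cons, take_cons_take]
          · simp [h, ih]

theorem foldl_insertBy_take {α : Type} (p : Int × Int → Int × Int → Bool) (n : Nat)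
    (g : α → Int × Int) (xs : List α) (l : List (Int × Int)) :
    xs.foldl (fun st i => (PySem.List.insertBy p (g i) st).take n) (l.take n)
      = (xs.foldl (fun st i => PySem.List.insertBy p (g i) st) l).take n := by
  induction xs generalizing l with
  | nil => rfl
  | cons x xs ih =>
      simp only [List.foldl_cons]
      rw [take_insertBy, ih]

-- the unguarded top-3 accumulator is the first three elements of A's stable sort
theorem top3_eq_take3_sorted (rng : List Int) (g : Int → Int × Int) :
    rng.foldl (fun top i => (bInsert top (g i)).take 3) []
      = (PySem.List.sorted (rng.map g) (fun x => x.1)).take 3 := by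
  rw [PySem.List.sorted_eq_foldl_insertBy, List.foldl_map,
    ← foldl_insertBy_take (fun a b => decide (a.1 < b.1)) 3 g rng []]
  simp only [List.take_nil, bInsert_eq_insertBy]

theorem bInsert_pairwise (l : List (Int × Int)) (x : Int × Int)
    (h : l.Pairwise (fun a b => a.1 ≤ b.1)) :
    (bInsert l x).Pairwise (fun a b => a.1 ≤ b.1) := by
  induction l with
  | nil => simp [bInsert]
  | cons y ys ih =>
      rcases List.pairwise_cons.mp h with ⟨hy, hys⟩
      simp only [bInsert]
      by_cases hc : y.1 ≤ x.1
      · rw [if_pos hc]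
        refine List.pairwise_cons.mpr ⟨?_, ih hys⟩
        intro z hz
        rw [bInsert_eq_insertBy] at hz
        rcases (PySem.List.mem_insertBy _ _ _ _).mp hz with rfl | hz
        · exact hc
        · exact hy z hz
      · rw [if_neg hc]
        refine List.pairwise_cons.mpr ⟨?_, h⟩
        intro z hz
        rcases List.mem_cons.mp hz with rfl | hz
        · exact le_of_not_ge hc
        · exact le_trans (le_of_not_ge hc) (hy z hz)

-- B's loop body = "insert, then truncate to 3" on every reachable accumulator
theorem bStep_eq (top : List (Int × Int)) (p : Int × Int)
    (hp : top.Pairwise (fun a b => a.1 ≤ b.1)) (hl : top.length ≤ 3) :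
    bStep top p = (bInsert top (p.2, p.1)).take 3 := by
  unfold bStep
  by_cases h3 : top.length = 3
  · match top, h3 with
    | [y0, y1, y2], _ =>
        by_cases hv : y2.1 ≤ p.2
        · rw [if_pos ⟨rfl, by simpa [PySem.List.pyGetD] using hv⟩]
          rcases List.pairwise_cons.mp hp with ⟨h0, hp1⟩
          rcases List.pairwise_cons.mp hp1 with ⟨h1, -⟩
          have h02 : y0.1 ≤ p.2 := le_trans (h0 y2 (by simp)) hv
          have h12 : y1.1 ≤ p.2 := le_trans (h1 y2 (by simp)) hv
          simp [bInsert, h02, h12, hv]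
        · have hcond : ¬([y0, y1, y2].length = 3 ∧
              (PySem.List.pyGetD [y0, y1, y2] 2 (0, 0)).1 ≤ p.2) := by
            simpa [PySem.List.pyGetD] using hv
          rw [if_neg hcond, if_pos (show [y0, y1, y2].length = 3 from rfl)]
          by_cases h0 : y0.1 ≤ p.2 <;> by_cases h1 : y1.1 ≤ p.2 <;>
            simp [bInsert, h0, h1, hv, List.take]
  · rw [if_neg (fun h => h3 h.1), if_neg h3,
      List.take_of_length_le (by rw [bInsert_length]; omega)]

-- replacing B's loop body by the unguarded "insert then truncate" step
theorem guarded_fold_eq (nums : List Int) (rng : List Int) (l : List (Int × Int))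
    (hp : l.Pairwise (fun a b => a.1 ≤ b.1)) (hl : l.length ≤ 3) :
    rng.foldl (fun x y => bStep x (y, PySem.List.pyGetD nums y 0)) l
      = rng.foldl (fun top i => (bInsert top (PySem.List.pyGetD nums i 0, i)).take 3) l := by
  induction rng generalizing l with
  | nil => rfl
  | cons i rng ih =>
      simp only [List.foldl_cons]
      rw [bStep_eq l _ hp hl]
      exact ih _ ((bInsert_pairwise l _ hp).sublist (List.take_sublist 3 _))
        (le_trans (List.length_take_le 3 _) (le_refl 3))

-- enumerate(nums[1:len(nums)-1], 1) lists (i, nums[i]) for the interior indices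
theorem enum_slice_eq (nums : List Int) :
    PySem.List.enumerate
        (PySem.List.slice nums (some 1) (some (PySem.List.len nums - 1))) 1
      = (PySem.List.pyRange 1 (PySem.List.len nums - 1) 1).map
          (fun i => (i, PySem.List.pyGetD nums i 0)) := by
  rcases Nat.eq_zero_or_pos nums.length with h0 | h0
  · rcases List.length_eq_zero_iff.mp h0 with rfl
    rfl
  · have hlen : PySem.List.len nums - 1 = ((nums.length - 1 : Nat) : Int) := by
      simp only [PySem.List.len_eq]; omega
    rw [hlen, show (some (1 : Int)) = some ((1 : Nat) : Int) from rfl,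
      PySem.List.slice_natCast]
    apply List.ext_getElem
    · simp [PySem.List.length_enumerate, PySem.List.length_pyRange_one]
    · intro k hk hk'
      rw [PySem.List.getElem_enumerate, List.getElem_map,
        PySem.List.getElem_pyRange_one]
      have hkn : 1 + k < nums.length := by
        simp [PySem.List.length_enumerate] at hk
        omega
      have hidx : PySem.List.pyGetD nums (1 + (k : Int)) 0 = nums[1 + k] := by
        rw [show (1 : Int) + (k : Int) = ((1 + k : Nat) : Int) by push_cast; ring,
          PySem.List.pyGetD_natCast]
        simp [hkn]
      rw [List.getElem_take, List.getElem_drop, hidx]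

-- ===== VERDICT (by name: the statement is the Claim_ definition above) =====
theorem f_spec : Claim_equal_f := by
  intro nums _hdom hpre
  unfold Spec_f f f_alt
  have harr : (PySem.List.pyRange 1 (PySem.List.len nums - 1) 1).foldl
      (fun arr i => arr ++ [(PySem.List.pyGetD nums i 0, i)]) []
      = (PySem.List.pyRange 1 (PySem.List.len nums - 1) 1).map
          (fun i => (PySem.List.pyGetD nums i 0, i)) := by
    rw [PySem.List.foldl_append_singleton_eq_map]; rfl
  rw [harr, enum_slice_eq, List.foldl_map,
    guarded_fold_eq nums _ [] (by simp) (by simp), top3_eq_take3_sorted]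
  set s := PySem.List.sorted
      ((PySem.List.pyRange 1 (PySem.List.len nums - 1) 1).map
        (fun i => (PySem.List.pyGetD nums i 0, i))) (fun x => x.1) with hs
  have hlen : 3 ≤ s.length := by
    rw [hs, PySem.List.length_sorted, List.length_map,
      PySem.List.length_pyRange_one]
    have : PySem.List.len nums = (nums.length : Int) := by
      simp [PySem.List.len_eq]
    rw [this]
    unfold Pre_f at hpre
    omega
  match s, hlen with
  | a :: b :: c :: t, _ => simp [PySem.List.pyGet?, PySem.List.pyIdx?]
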